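-- pv_equiv track=rewrite | github.com/zmerlynn/advent-of-code | 2021/d12p2.py | viable
-- ===== SOURCE A (Python) =====
-- import collections
--
-- def viable(path, option):
--     if option.isupper():
--         return True
--     if option not in path:
--         return True
--     if option == 'start':
--         return False
--
--     cnt = collections.Counter(path)
--     retraversed = False
--     for v, c in cnt.items():
--         if not v.isupper() and c > 1:
--             retraversed = True
--     return not retraversed
-- ===== SOURCE B (Python) =====
-- def viable(path, option):
--     if option.isupper():
--         return True
--     if option not in path:
--         return True
--     if option == 'start':
--         return False
--
--     p = sorted(path)
--     return all(a.isupper() or a != b for a, b in zip(p, p[1:]))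
-- ===== Notes on version B (the rewrite author's own statement) =====
-- stated objective: alternative
-- what changed: Replaces A's frequency-table algorithm (build a Counter of path, then rescan its items for a small cave with count > 1) with a sort-based one: sort the path, then check that no two adjacent entries are equal lowercase caves (duplicates are adjacent after sorting).
import Mathlib
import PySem

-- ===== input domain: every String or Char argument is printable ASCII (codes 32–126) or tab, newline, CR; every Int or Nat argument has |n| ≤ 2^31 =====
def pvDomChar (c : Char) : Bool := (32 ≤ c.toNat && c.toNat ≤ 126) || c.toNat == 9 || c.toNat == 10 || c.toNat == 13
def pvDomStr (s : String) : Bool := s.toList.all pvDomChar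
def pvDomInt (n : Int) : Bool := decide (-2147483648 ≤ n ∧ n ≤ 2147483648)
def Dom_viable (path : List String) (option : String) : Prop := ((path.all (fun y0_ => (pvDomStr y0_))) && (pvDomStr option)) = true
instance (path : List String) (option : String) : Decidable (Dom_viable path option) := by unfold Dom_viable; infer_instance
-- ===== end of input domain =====

-- B detects a re-traversed small cave by sorting the path and checking adjacent entries,
-- instead of A's Counter build plus items rescan (objective: alternative).

-- ===== PORT A =====
-- s.isupper(): exact on the ASCII domain, where the cased characters are exactly the letters.
def strIsupper (s : String) : Bool :=
  !(s.toList.any (fun c => PySem.Chars.islower c)) && s.toList.any (fun c => PySem.Chars.isupper c)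

def viable (path : List String) (option : String) : Bool :=
  if strIsupper option then true
  else if !(path.contains option) then true
  else if option == "start" then false
  else
    let cnt := PySem.Dict.counter path
    let retraversed := cnt.items.foldl
      (fun r (vc : String × Int) => if !strIsupper vc.1 && vc.2 > 1 then true else r) false
    !retraversed

-- ===== PORT B =====
def viable_alt (path : List String) (option : String) : Bool :=
  if strIsupper option then true
  else if !(path.contains option) then true
  else if option == "start" then false
  else
    let p := PySem.List.sorted path (fun x => x) false
    (p.zip (PySem.List.slice p (some 1) none)).all
      (fun ab => strIsupper ab.1 || ab.1 != ab.2)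

-- ===== PRECONDITION & SPEC =====
def Spec_viable (path : List String) (option : String) (out : Bool) : Prop := out = viable_alt path option
instance (path : List String) (option : String) (out : Bool) : Decidable (Spec_viable path option out) := by unfold Spec_viable; infer_instance

-- ===== CLAIM (what is proved, stated in full; the proofs are below) =====
def Claim_equal_viable : Prop := ∀ (path : List String) (option : String), Dom_viable path option → Spec_viable path option (viable path option)

-- ===== LEMMAS AND PROOFS =====

theorem foldl_if_true (p : String × Int → Bool) (l : List (String × Int)) (b : Bool) :
    l.foldl (fun r x => if p x then true else r) b = (b || l.any p) := by
  induction l generalizing b with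
  | nil => simp
  | cons x xs ih =>
    simp only [List.foldl_cons, List.any_cons]
    cases h : p x
    · rw [if_neg (by decide), ih]; simp
    · rw [if_pos (by decide), ih]; simp

theorem counter_any_iff (path : List String) :
    ((PySem.Dict.counter path).items.any
      (fun vc => !strIsupper vc.1 && vc.2 > 1) = true) ↔
      ∃ v ∈ path, strIsupper v = false ∧ 1 < path.count v := by
  rw [PySem.Dict.items_counter, List.any_map, List.any_eq_true]
  constructor
  · rintro ⟨v, hv, hp⟩
    simp only [Function.comp, Bool.and_eq_true, Bool.not_eq_true', decide_eq_true_eq] at hp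
    refine ⟨v, (PySem.Set.mem_ofList path v).mp hv, hp.1, ?_⟩
    have := hp.2
    exact_mod_cast this
  · rintro ⟨v, hv, h1, h2⟩
    refine ⟨v, (PySem.Set.mem_ofList path v).mpr hv, ?_⟩
    simp only [Function.comp, Bool.and_eq_true, Bool.not_eq_true', decide_eq_true_eq]
    exact ⟨h1, by exact_mod_cast h2⟩

-- the adjacent-pairs scan on a ≤-sorted list detects exactly the duplicated lowercase entries
theorem zip_all_iff (l : List String) (hp : l.Pairwise (· ≤ ·)) :
    ((l.zip l.tail).all (fun ab => strIsupper ab.1 || ab.1 != ab.2) = true) ↔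
      ∀ v, strIsupper v = false → l.count v ≤ 1 := by
  induction l with
  | nil => simp
  | cons a rest ih =>
    rcases List.pairwise_cons.mp hp with ⟨ha, hrest⟩
    cases rest with
    | nil =>
      simp only [List.tail_cons, List.zip_nil_right, List.all_nil, true_iff]
      intro v _
      rcases eq_or_ne a v with h | h
      · simp [h]
      · simp [h]
    | cons b t =>
      have hbt : ∀ y ∈ t, b ≤ y := (List.pairwise_cons.mp hrest).1
      simp only [List.tail_cons] at ih ⊢
      simp only [List.zip_cons_cons, List.all_cons, Bool.and_eq_true]
      rw [ih hrest]
      constructor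
      · rintro ⟨hab, hcnt⟩ v hv
        by_cases hva : v = a
        · have hua : strIsupper a = false := by rw [← hva]; exact hv
          have hne : a ≠ b := by
            intro e
            rw [hua, e] at hab
            simp at hab
          have hnt : a ∉ t := fun hat => hne (le_antisymm (ha b (by simp)) (hbt a hat))
          have h0 : List.count v (b :: t) = 0 := by
            rw [hva, List.count_eq_zero]
            simp only [List.mem_cons, not_or]
            exact ⟨hne, hnt⟩
          rw [List.count_cons, h0]
          split <;> omega
        · have h1 := hcnt v hv
          have h2 : (a == v) = false := by
            simp only [beq_eq_false_iff_ne]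
            exact fun e => hva e.symm
          rw [List.count_cons, h2]
          simpa using h1
      · intro h
        refine ⟨?_, ?_⟩
        · by_cases hu : strIsupper a = true
          · simp [hu]
          · have hua : strIsupper a = false := by simpa using hu
            have hcount := h a hua
            have hne : a ≠ b := by
              intro e
              rw [List.count_cons, List.count_cons] at hcount
              simp only [beq_self_eq_true, if_pos, ← e] at hcount
              omega
            simp [hne]
        · intro v hv
          have h1 := h v hv
          rw [List.count_cons] at h1
          split at h1 <;> omega

theorem loops_eq (path : List String) :
    (!(PySem.Dict.counter path).items.foldl
      (fun r (vc : String × Int) => if !strIsupper vc.1 && vc.2 > 1 then true else r) false)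
      = ((PySem.List.sorted path (fun x => x) false).zip
          (PySem.List.slice (PySem.List.sorted path (fun x => x) false) (some 1) none)).all
          (fun ab => strIsupper ab.1 || ab.1 != ab.2) := by
  set p := PySem.List.sorted path (fun x => x) false with hpdef
  have hperm : p.Perm path := PySem.List.sorted_perm path (fun x => x) false
  have hpair : p.Pairwise (· ≤ ·) := PySem.List.sorted_pairwise path (fun x => x)
  rw [PySem.List.slice_from_one, foldl_if_true]
  simp only [Bool.false_or]
  have hkey : ((p.zip p.tail).all (fun ab => strIsupper ab.1 || ab.1 != ab.2) = true) ↔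
      ∀ v, strIsupper v = false → path.count v ≤ 1 := by
    rw [zip_all_iff p hpair]
    constructor
    · intro h v hv
      have := h v hv
      rwa [hperm.count_eq] at this
    · intro h v hv
      rw [hperm.count_eq]
      exact h v hv
  cases hb : (p.zip p.tail).all (fun ab => strIsupper ab.1 || ab.1 != ab.2)
  · have h : ¬ ∀ v, strIsupper v = false → path.count v ≤ 1 := by
      intro hc
      exact absurd (hkey.mpr hc) (by simp [hb])
    push Not at h
    obtain ⟨v, h1, h2⟩ := h
    have hv : v ∈ path := List.count_pos_iff.mp (by omega)
    have hA := (counter_any_iff path).mpr ⟨v, hv, h1, by omega⟩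
    simp [hA]
  · have h := hkey.mp hb
    have hA : ((PySem.Dict.counter path).items.any
        (fun vc => !strIsupper vc.1 && vc.2 > 1)) = false := by
      rw [← Bool.not_eq_true, counter_any_iff]
      rintro ⟨v, hv, h1, h2⟩
      have := h v h1
      omega
    simp [hA]

-- ===== VERDICT (by name: the statement is the Claim_ definition above) =====
theorem viable_spec : Claim_equal_viable := by
  intro path option _
  unfold Spec_viable viable viable_alt
  split_ifs <;> first | rfl | exact loops_eq path
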